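-- pv_equiv track=rewrite | github.com/Fxdf-IV/EoF-Labyrinth-Decoder | src/decoders/text_decoder.py | decode_binary_braille
-- ===== SOURCE A (Python) =====
-- def decode_binary_braille(text):
--     """Decodifica texto em binário"""
--     try:
--         # Remove espaços e outros caracteres
--         binary = ''.join(c for c in text if c in '01')
--
--         # Verifica se o comprimento é múltiplo de 8
--         if len(binary) % 8 != 0:
--             return "Erro: O texto binário deve ter um número de bits múltiplo de 8"
--
--         # Converte grupos de 8 bits em caracteres
--         result = ''
--         for i in range(0, len(binary), 8):
--             byte = binary[i:i+8]
--             result += chr(int(byte, 2))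
--
--         return result
--     except Exception as e:
--         return f"Erro ao decodificar binário: {str(e)}"
-- ===== SOURCE B (Python) =====
-- def decode_binary_braille(text):
--     """Decodifica texto em binário"""
--     try:
--         binary = ''.join(c for c in text if c in '01')
--
--         if len(binary) % 8 != 0:
--             return "Erro: O texto binário deve ter um número de bits múltiplo de 8"
--
--         if not binary:
--             return ''
--
--         # One-shot: whole bit string as one integer, split into bytes
--         n = int(binary, 2)
--         return n.to_bytes(len(binary) // 8, 'big').decode('latin-1')
--     except Exception as e:
--         return f"Erro ao decodificar binário: {str(e)}"
-- ===== Notes on version B (the rewrite author's own statement) =====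
-- stated objective: idiomatic
-- what changed: B converts the whole filtered bit string to one integer with int(binary,2) and emits all bytes at once via n.to_bytes(len//8,'big').decode('latin-1'), replacing A's per-8-bit slicing loop with char-by-char concatenation.
import Mathlib
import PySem

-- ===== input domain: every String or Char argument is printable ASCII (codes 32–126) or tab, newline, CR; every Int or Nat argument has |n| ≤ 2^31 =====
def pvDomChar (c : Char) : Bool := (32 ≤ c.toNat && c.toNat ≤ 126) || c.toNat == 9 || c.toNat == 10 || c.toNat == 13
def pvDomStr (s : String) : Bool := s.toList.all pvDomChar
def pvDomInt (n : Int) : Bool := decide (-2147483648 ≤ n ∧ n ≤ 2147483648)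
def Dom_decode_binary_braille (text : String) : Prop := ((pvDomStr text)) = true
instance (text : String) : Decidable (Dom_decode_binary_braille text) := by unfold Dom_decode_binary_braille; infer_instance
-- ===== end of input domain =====

-- B decodes the whole bit string as one big integer split into big-endian bytes (int(binary,2) + to_bytes)
-- instead of A's per-8-bit slicing loop; objective: idiomatic. Equivalence proved on all inputs.

-- Shared hand port of Python's int(s, 2): exact for nonempty strings consisting only of '0'/'1'
-- characters, which are the only strings either program passes to it (the filtered chunks).
def pvBitVal (c : Char) : Nat := if c = '1' then 1 else 0
def pvIntBase2 (cs : List Char) : Nat := cs.foldl (fun a c => 2 * a + pvBitVal c) 0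

-- ===== PORT A =====
-- try/except: on the admitted inputs no exception can be raised (every 8-bit chunk is a nonempty
-- '0'/'1' string, so int(byte,2) succeeds and chr gets a value in 0..255), so the except arm is dead.
def decode_binary_braille (text : String) : String :=
  let binary : List Char := text.toList.filter (fun c => c = '0' || c = '1')
  if binary.length % 8 ≠ 0 then
    "Erro: O texto binário deve ter um número de bits múltiplo de 8"
  else
    let result : List Char :=
      (PySem.List.pyRange 0 (binary.length : Int) 8).foldl
        (fun result i =>
          let byte := PySem.List.slice binary (some i) (some (i + 8))
          result ++ [Char.ofNat (pvIntBase2 byte)]) []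
    String.mk result

-- ===== PORT B =====
-- Hand port of n.to_bytes(k, 'big') followed by .decode('latin-1') (identity on bytes 0..255):
-- exact for n < 256^k, which holds for every value produced here.
def pvToBytesBE : Nat → Nat → List Char
  | 0, _ => []
  | k + 1, n => pvToBytesBE k (n / 256) ++ [Char.ofNat (n % 256)]

def decode_binary_braille_alt (text : String) : String :=
  let binary : List Char := text.toList.filter (fun c => c = '0' || c = '1')
  if binary.length % 8 ≠ 0 then
    "Erro: O texto binário deve ter um número de bits múltiplo de 8"
  else if binary.isEmpty then ""
  else
    let n := pvIntBase2 binary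
    String.mk (pvToBytesBE (binary.length / 8) n)

-- ===== PRECONDITION & SPEC =====
def Spec_decode_binary_braille (text : String) (out : String) : Prop := out = decode_binary_braille_alt text
instance (text : String) (out : String) : Decidable (Spec_decode_binary_braille text out) := by unfold Spec_decode_binary_braille; infer_instance

-- ===== CLAIM (what is proved, stated in full; the proofs are below) =====
def Claim_equal_decode_binary_braille : Prop := ∀ (text : String), Dom_decode_binary_braille text → Spec_decode_binary_braille text (decode_binary_braille text)

-- ===== LEMMAS AND PROOFS =====

theorem pvIntBase2_from (cs : List Char) : ∀ a : Nat,
    cs.foldl (fun a c => 2 * a + pvBitVal c) a = a * 2 ^ cs.length + pvIntBase2 cs := by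
  induction cs with
  | nil => intro a; simp [pvIntBase2]
  | cons c cs ih =>
    intro a
    simp only [List.foldl_cons, List.length_cons, pvIntBase2]
    rw [ih (2 * a + pvBitVal c), ih (2 * 0 + pvBitVal c)]
    ring

theorem pvIntBase2_lt (cs : List Char) : pvIntBase2 cs < 2 ^ cs.length := by
  induction cs with
  | nil => simp [pvIntBase2]
  | cons c cs ih =>
    show List.foldl _ (2 * 0 + pvBitVal c) cs < _
    rw [pvIntBase2_from]
    have : pvBitVal c ≤ 1 := by unfold pvBitVal; split <;> omega
    simp only [List.length_cons, pow_succ]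
    nlinarith [pow_pos (by norm_num : (0:Nat) < 2) cs.length]

theorem pvIntBase2_append (xs ys : List Char) :
    pvIntBase2 (xs ++ ys) = pvIntBase2 xs * 2 ^ ys.length + pvIntBase2 ys := by
  unfold pvIntBase2
  rw [List.foldl_append, pvIntBase2_from]; rfl

-- chunk-map characterisation vs byte decomposition, by induction splitting the LAST 8 bits
theorem pv_main : ∀ (k : Nat) (bits : List Char), bits.length = 8 * k →
    (List.range k).map (fun i => Char.ofNat (pvIntBase2 ((bits.drop (8 * i)).take 8)))
      = pvToBytesBE k (pvIntBase2 bits) := by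
  intro k
  induction k with
  | zero => intro bits h; simp [pvToBytesBE]
  | succ k ih =>
    intro bits h
    have hlen : (bits.take (8 * k)).length = 8 * k := by
      simp [List.length_take]; omega
    have hsplit : bits = bits.take (8 * k) ++ bits.drop (8 * k) := (List.take_append_drop _ _).symm
    set rest := bits.take (8 * k) with hrest
    set c := bits.drop (8 * k) with hc
    have hclen : c.length = 8 := by
      simp [hc, List.length_drop]; omega
    have hval : pvIntBase2 bits = pvIntBase2 rest * 256 + pvIntBase2 c := by
      rw [hsplit, pvIntBase2_append, hclen]; norm_num
    have hcl : pvIntBase2 c < 256 := by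
      have := pvIntBase2_lt c; rwa [hclen] at this
    have hdiv : pvIntBase2 bits / 256 = pvIntBase2 rest := by omega
    have hmod : pvIntBase2 bits % 256 = pvIntBase2 c := by omega
    rw [List.range_succ, List.map_append]
    show _ ++ [Char.ofNat (pvIntBase2 ((bits.drop (8 * k)).take 8))] = pvToBytesBE (k+1) (pvIntBase2 bits)
    rw [show pvToBytesBE (k+1) (pvIntBase2 bits)
          = pvToBytesBE k (pvIntBase2 bits / 256) ++ [Char.ofNat (pvIntBase2 bits % 256)] from rfl,
        hdiv, hmod, ← ih rest hlen]
    congr 1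
    · apply List.map_congr_left
      intro i hi
      have hik : i < k := List.mem_range.mp hi
      congr 2
      rw [hsplit]
      rw [List.drop_append_of_le_length (by omega)]
      rw [List.take_append_of_le_length (by simp [hrest]; omega)]
    · congr 2
      rw [← hc, List.take_of_length_le (le_of_eq hclen)]

-- A's loop in map form over the step-8 range
theorem pv_loop (bits : List Char) (k : Nat) (h : bits.length = 8 * k) :
    (PySem.List.pyRange 0 (bits.length : Int) 8).foldl
        (fun result i =>
          let byte := PySem.List.slice bits (some i) (some (i + 8))
          result ++ [Char.ofNat (pvIntBase2 byte)]) []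
      = (List.range k).map (fun i => Char.ofNat (pvIntBase2 ((bits.drop (8 * i)).take 8))) := by
  rw [PySem.List.pyRange_of_pos 0 (bits.length : Int) (by norm_num)]
  have hcnt : (if (0:Int) < (bits.length : Int) then (((bits.length : Int) - 0 + 8 - 1) / 8).toNat else 0) = k := by
    rw [h]; split
    · push_cast; omega
    · omega
  rw [hcnt]
  rw [PySem.List.foldl_append_singleton_eq_map
        (fun i => Char.ofNat (pvIntBase2 (PySem.List.slice bits (some i) (some (i + 8)))))]
  rw [List.nil_append, List.map_map]
  apply List.map_congr_left
  intro i hi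
  simp only [Function.comp_apply, zero_add]
  congr 1
  have : (8 : Int) * (i : Int) = ((8 * i : Nat) : Int) := by push_cast; ring
  rw [this, show ((8 * i : Nat) : Int) + 8 = ((8 * i : Nat) : Int) + ((8:Nat) : Int) from by norm_num,
      PySem.List.slice_natCast_add]

-- ===== VERDICT (by name: the statement is the Claim_ definition above) =====
theorem decode_binary_braille_spec : Claim_equal_decode_binary_braille := by
  intro text _
  unfold Spec_decode_binary_braille decode_binary_braille decode_binary_braille_alt
  set binary := text.toList.filter (fun c => c = '0' || c = '1') with hb
  by_cases h8 : binary.length % 8 = 0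
  · simp only [h8, ne_eq, not_true_eq_false, if_false]
    have hk : binary.length = 8 * (binary.length / 8) := by omega
    rw [pv_loop binary (binary.length / 8) hk, pv_main (binary.length / 8) binary hk]
    by_cases he : binary.isEmpty
    · have h0 : binary.length = 0 := by simpa [List.isEmpty_iff_length_eq_zero] using he
      simp [he, h0, pvToBytesBE]
      rfl
    · simp [he]
  · simp [h8]
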